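-- pv_equiv track=rewrite | github.com/OloinMilsom/Advent2017 | Day06_0.py | balance_list
-- ===== SOURCE A (Python) =====
-- def balance_list(int_list):
--     maximum = max(int_list)
--     max_index = int_list.index(maximum)
--     int_list[max_index] = 0
--     for i in range(maximum):
--         curr_index = max_index + i + 1
--         while curr_index >= len(int_list):
--             curr_index -= len(int_list)
--         int_list[curr_index] += 1
--     return int_list
-- ===== SOURCE B (Python) =====
-- def balance_list(int_list):
--     n = len(int_list)
--     maximum = max(int_list)
--     max_index = int_list.index(maximum)
--     q, r = divmod(max(maximum, 0), n)
--     for j in range(n):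
--         d = (j - max_index - 1) % n
--         int_list[j] = (0 if j == max_index else int_list[j]) + q + (1 if d < r else 0)
--     return int_list
-- ===== Notes on version B (the rewrite author's own statement) =====
-- stated objective: faster
-- what changed: Replaces the O(maximum)-step one-by-one redistribution loop with a closed-form divmod: every slot gets maximum//n, and the first maximum%n slots cyclically after the max index get one extra.
import Mathlib
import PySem

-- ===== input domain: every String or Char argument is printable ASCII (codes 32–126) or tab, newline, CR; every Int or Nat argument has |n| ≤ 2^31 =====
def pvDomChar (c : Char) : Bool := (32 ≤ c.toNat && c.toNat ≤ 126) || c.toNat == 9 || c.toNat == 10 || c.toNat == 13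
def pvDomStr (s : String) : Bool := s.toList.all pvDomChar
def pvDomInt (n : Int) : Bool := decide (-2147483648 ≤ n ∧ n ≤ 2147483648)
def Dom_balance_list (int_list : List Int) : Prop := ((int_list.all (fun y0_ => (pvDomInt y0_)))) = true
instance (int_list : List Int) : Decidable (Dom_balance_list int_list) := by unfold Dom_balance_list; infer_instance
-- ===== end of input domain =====

-- B replaces A's O(maximum)-step one-by-one redistribution loop by a closed-form divmod
-- (every slot gets maximum//n, the first maximum%n slots cyclically after the max index get one extra).
-- Both A and B mutate the argument list in Python; the equivalence proved here is about the return value.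

-- ===== PORT A =====
-- the 'while curr_index >= len(int_list): curr_index -= len(int_list)' loop of A
def pvWrap (c n : Int) : Int :=
  if _h : 0 < n ∧ n ≤ c then pvWrap (c - n) n else c
termination_by c.toNat
decreasing_by omega

-- one iteration of A's 'for i in range(maximum)' body
def pvStepA (max_index : Nat) (l : List Int) (i : Int) : List Int :=
  let curr := pvWrap ((max_index : Int) + i + 1) (l.length : Int)
  l.set curr.toNat (PySem.List.pyGetD l curr 0 + 1)

def balance_list (int_list : List Int) : List Int :=
  match PySem.List.max? int_list (fun y => y) with
  | none => int_list          -- max([]) raises ValueError: excluded by Pre_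
  | some maximum =>
    match PySem.List.index? int_list maximum with
    | none => int_list        -- unreachable: the max is a member
    | some max_index =>
      (PySem.List.pyRange 0 maximum 1).foldl (pvStepA max_index) (int_list.set max_index 0)

-- ===== PORT B =====
def balance_list_alt (int_list : List Int) : List Int :=
  match PySem.List.max? int_list (fun y => y) with
  | none => int_list          -- max([]) raises ValueError: excluded by Pre_
  | some maximum =>
    match PySem.List.index? int_list maximum with
    | none => int_list        -- unreachable
    | some max_index =>
      match PySem.Int.divmod? (max maximum 0) (int_list.length : Int) with
      | none => int_list      -- unreachable under Pre_ (length ≠ 0)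
      | some (q, r) =>
        (List.range int_list.length).map (fun (j : Nat) =>
          let d := PySem.Int.mod ((j : Int) - (max_index : Int) - 1) (int_list.length : Int)
          (if (j : Int) = (max_index : Int) then 0 else int_list.getD j 0) + q
            + (if d < r then 1 else 0))

-- ===== PRECONDITION & SPEC =====
-- Pre_ excludes only the empty list, on which Python's max([]) raises ValueError (in A and in B).
def Pre_balance_list (int_list : List Int) : Prop := int_list ≠ []
instance (int_list : List Int) : Decidable (Pre_balance_list int_list) := by unfold Pre_balance_list; infer_instance
def pvWitness_balance_list : List Int := [0, 2, 7, 0]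

def Spec_balance_list (int_list : List Int) (out : List Int) : Prop := out = balance_list_alt int_list
instance (int_list : List Int) (out : List Int) : Decidable (Spec_balance_list int_list out) := by unfold Spec_balance_list; infer_instance

-- ===== CLAIM (what is proved, stated in full; the proofs are below) =====
def Claim_equal_balance_list : Prop := ∀ (int_list : List Int), Dom_balance_list int_list → Pre_balance_list int_list → Spec_balance_list int_list (balance_list int_list)

-- ===== LEMMAS AND PROOFS =====

lemma pvWrap_eq_emod (c n : Int) (hc : 0 ≤ c) (hn : 0 < n) : pvWrap c n = c % n := by
  rw [pvWrap]
  split_ifs with h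
  · rw [pvWrap_eq_emod (c - n) n (by omega) hn, Int.sub_emod_right]
  · rw [Int.emod_eq_of_lt hc (by omega)]
termination_by c.toNat
decreasing_by omega

lemma length_pvStepA (mi : Nat) (l : List Int) (i : Int) : (pvStepA mi l i).length = l.length := by
  simp [pvStepA]

lemma length_foldA (mi : Nat) (rng : List Int) (L : List Int) :
    (rng.foldl (pvStepA mi) L).length = L.length := by
  induction rng generalizing L with
  | nil => rfl
  | cons x t ih => simp [List.foldl_cons, ih, length_pvStepA]

lemma pvStepA_nat (mi n : Nat) (hn : 0 < n) (l : List Int) (hl : l.length = n) (i : Nat) :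
    pvStepA mi l (i : Int) =
      l.set ((mi + i + 1) % n) (l.getD ((mi + i + 1) % n) 0 + 1) := by
  have hn' : (0 : Int) < (n : Int) := by exact_mod_cast hn
  have hw : pvWrap ((mi : Int) + (i : Int) + 1) (n : Int) = (((mi + i + 1) % n : Nat) : Int) := by
    rw [pvWrap_eq_emod _ _ (by omega) hn']
    push_cast
    ring
  simp only [pvStepA, hl, hw, Int.toNat_natCast, PySem.List.pyGetD_natCast, List.getD]

lemma getD_set_eq (l : List Int) (i j : Nat) (v : Int) (hj : j < l.length) :
    (l.set i v).getD j 0 = if i = j then v else l.getD j 0 := by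
  simp only [List.getD_eq_getElem?_getD, List.getElem?_set]
  split_ifs with h h2
  · simp
  · exact absurd (h ▸ hj) h2
  · rfl

lemma succ_mod_aux (n k : Nat) (hn : 0 < n) : (k + 1) % n = (k % n + 1) % n := by
  conv_lhs => rw [Nat.add_mod]
  rcases Nat.eq_or_lt_of_le hn with h | h
  · simp [← h]
  · rw [Nat.mod_eq_of_lt h]

lemma countRange_mod (n t : Nat) (hn : 0 < n) (ht : t < n) (k : Nat) :
    (List.range k).countP (fun i => i % n == t) = k / n + (if t < k % n then 1 else 0) := by
  induction k with
  | zero => simp [Nat.not_lt_of_le (Nat.zero_le t)]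
  | succ k ih =>
    rw [List.range_succ, List.countP_append, ih]
    simp only [List.countP_cons, List.countP_nil]
    have hlt : k % n < n := Nat.mod_lt _ hn
    by_cases hd : n ∣ (k + 1)
    · have h0 : (k + 1) % n = 0 := Nat.dvd_iff_mod_eq_zero.mp hd
      have hdiv : (k + 1) / n = k / n + 1 := Nat.succ_div_of_dvd hd
      have h1 := succ_mod_aux n k hn
      rw [h0] at h1
      have hb : k % n = n - 1 := by
        rcases Nat.lt_or_ge (k % n + 1) n with h2 | h2
        · rw [Nat.mod_eq_of_lt h2] at h1
          exact absurd h1.symm (Nat.succ_ne_zero _)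
        · generalize hB : k % n = b at hlt h2 ⊢
          omega
      rw [h0, hdiv, hb]
      clear ih h1 h0 hdiv hd hlt
      generalize k / n = Q
      by_cases he : n - 1 = t
      · have hb2 : ((n - 1 : Nat) == t) = true := beq_iff_eq.mpr he
        rw [hb2, if_pos rfl]
        split_ifs <;> omega
      · have hb2 : ((n - 1 : Nat) == t) = false := beq_eq_false_iff_ne.mpr he
        rw [hb2, if_neg Bool.false_ne_true]
        split_ifs <;> omega
    · have hnd : (k + 1) % n ≠ 0 := fun h => hd (Nat.dvd_of_mod_eq_zero h)
      have h1 := succ_mod_aux n k hn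
      have hlt2 : k % n + 1 < n := by
        rcases Nat.lt_or_ge (k % n + 1) n with h2 | h2
        · exact h2
        · have hEq : k % n + 1 = n := by
            generalize hB : k % n = b at hlt h2 ⊢
            omega
          rw [hEq, Nat.mod_self] at h1
          exact absurd h1 hnd
      rw [Nat.mod_eq_of_lt hlt2] at h1
      have hdiv : (k + 1) / n = k / n := Nat.succ_div_of_not_dvd hd
      rw [h1, hdiv]
      clear ih hnd h1 hd hdiv
      generalize hB : k % n = b at hlt ⊢
      generalize k / n = Q
      by_cases he : b = t
      · have hb2 : (b == t) = true := beq_iff_eq.mpr he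
        rw [hb2, if_pos rfl]
        split_ifs <;> omega
      · have hb2 : (b == t) = false := beq_eq_false_iff_ne.mpr he
        rw [hb2, if_neg Bool.false_ne_true]
        split_ifs <;> omega

lemma foldA_getD (mi n : Nat) (hn : 0 < n) (K : Nat) (L : List Int) (hL : L.length = n)
    (j : Nat) (hj : j < n) :
    ((List.range K).foldl (fun l (i : Nat) => pvStepA mi l (i : Int)) L).getD j 0
      = L.getD j 0 + ((List.range K).countP (fun i => (mi + i + 1) % n == j) : Int) := by
  induction K with
  | zero => simp
  | succ K ih =>
    rw [List.range_succ, List.foldl_append, List.countP_append]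
    simp only [List.foldl_cons, List.foldl_nil, List.countP_cons, List.countP_nil]
    set F := (List.range K).foldl (fun l (i : Nat) => pvStepA mi l (i : Int)) L with hF
    have hlen : F.length = n := by
      rw [hF]
      have h := length_foldA mi ((List.range K).map (fun i : Nat => (i : Int))) L
      rw [List.foldl_map] at h
      rw [h, hL]
    rw [pvStepA_nat mi n hn F hlen K, getD_set_eq F _ j _ (by omega), ih]
    by_cases he : (mi + K + 1) % n = j
    · have hb : ((mi + K + 1) % n == j) = true := beq_iff_eq.mpr he
      rw [if_pos he, hb, if_pos rfl, he, ih]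
      push_cast
      ring
    · have hb : ((mi + K + 1) % n == j) = false := beq_eq_false_iff_ne.mpr he
      rw [if_neg he, hb, if_neg Bool.false_ne_true]
      push_cast
      ring

lemma pred_iff (mi n j i : Nat) (hn : 0 < n) (hj : j < n) :
    ((mi + i + 1) % n = j) ↔ (i % n = ((((j : Int) - mi - 1) % n).toNat)) := by
  have hn' : (0 : Int) < (n : Int) := by exact_mod_cast hn
  have hnz : (n : Int) ≠ 0 := hn'.ne'
  have hE : 0 ≤ ((j : Int) - mi - 1) % n := Int.emod_nonneg _ hnz
  have hcast : ∀ a b : Nat, (a % n = b) ↔ ((a : Int) % (n : Int) = (b : Int)) := by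
    intro a b
    rw [← Int.natCast_emod]
    exact_mod_cast Iff.rfl
  rw [hcast]
  have h2 : (i % n : Nat) = ((((j : Int) - mi - 1) % n).toNat) ↔
      ((i : Int) % n = ((j : Int) - mi - 1) % n) := by
    rw [← Int.toNat_of_nonneg hE]
    rw [← Int.natCast_emod]
    constructor
    · intro h; exact_mod_cast congrArg (fun x : Nat => (x : Int)) h
    · intro h; exact_mod_cast h
  rw [h2]
  push_cast
  have hj' : (j : Int) % n = (j : Int) := Int.emod_eq_of_lt (by positivity) (by exact_mod_cast hj)
  conv_lhs => rw [← hj']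
  rw [Int.emod_eq_emod_iff_emod_sub_eq_zero, Int.emod_eq_emod_iff_emod_sub_eq_zero]
  have hsame : ((i : Int) - ((j : Int) - (mi : Int) - 1)) = ((mi : Int) + (i : Int) + 1 - (j : Int)) := by ring
  rw [hsame]

-- ===== VERDICT (by name: the statement is the Claim_ definition above) =====
theorem balance_list_spec : Claim_equal_balance_list := by
  intro xs _hdom hpre
  unfold Spec_balance_list
  cases hmax : PySem.List.max? xs (fun y => y) with
  | none => exact absurd ((PySem.List.max?_eq_none_iff xs (fun y => y)).mp hmax) hpre
  | some m =>
  cases hidx : PySem.List.index? xs m with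
  | none =>
      have hm : m ∈ xs := PySem.List.max?_mem hmax
      rw [← PySem.List.index?_isSome_iff] at hm
      rw [hidx] at hm
      simp at hm
  | some mi =>
  obtain ⟨hmi, _hget, _⟩ := PySem.List.getElem_of_index?_eq_some hidx
  have hn : 0 < xs.length := List.length_pos_iff.mpr hpre
  have hn' : (0 : Int) < (xs.length : Int) := by exact_mod_cast hn
  have hnz : (xs.length : Int) ≠ 0 := hn'.ne'
  have hdm : PySem.Int.divmod? (max m 0) (xs.length : Int)
      = some (PySem.Int.floordiv (max m 0) (xs.length : Int), PySem.Int.mod (max m 0) (xs.length : Int)) := by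
    simp [PySem.Int.divmod?, PySem.Int.floordiv, PySem.Int.mod]
    exact hpre
  simp only [balance_list, balance_list_alt, hmax, hidx, hdm]
  rw [PySem.List.pyRange_zero, List.foldl_map]
  have hmax0 : max m 0 = ((m.toNat : Nat) : Int) := (Int.ofNat_toNat m).symm
  have hq : PySem.Int.floordiv (max m 0) (xs.length : Int) = ((m.toNat / xs.length : Nat) : Int) := by
    rw [hmax0]; exact PySem.Int.floordiv_natCast _ _
  have hr : PySem.Int.mod (max m 0) (xs.length : Int) = ((m.toNat % xs.length : Nat) : Int) := by
    rw [hmax0]; exact PySem.Int.mod_natCast _ _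
  have hlenA : ((List.range m.toNat).foldl (fun l (i : Nat) => pvStepA mi l (i : Int)) (xs.set mi 0)).length = xs.length := by
    have h := length_foldA mi ((List.range m.toNat).map (fun i : Nat => (i : Int))) (xs.set mi 0)
    rw [List.foldl_map] at h
    rw [h, List.length_set]
  apply List.ext_getElem
  · rw [hlenA]; simp
  · intro j hj1 hj2
    have hjn : j < xs.length := by rw [hlenA] at hj1; exact hj1
    rw [List.getElem_map, List.getElem_range]
    rw [← List.getD_eq_getElem _ 0 hj1]
    rw [foldA_getD mi xs.length hn m.toNat (xs.set mi 0) (by simp) j hjn]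
    rw [getD_set_eq xs mi j 0 hjn]
    have hpred : ((List.range m.toNat).countP (fun i => (mi + i + 1) % xs.length == j))
        = ((List.range m.toNat).countP (fun i => i % xs.length == ((((j : Int) - mi - 1) % (xs.length : Int)).toNat))) := by
      apply List.countP_congr
      intro a _
      simp only [beq_iff_eq]
      simp [pred_iff mi xs.length j a hn hjn]
    have htlt : ((((j : Int) - mi - 1) % (xs.length : Int)).toNat) < xs.length := by
      have h1 := Int.emod_nonneg ((j : Int) - mi - 1) hnz
      have h2 := Int.emod_lt_of_pos ((j : Int) - mi - 1) hn'
      omega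
    rw [hpred, countRange_mod xs.length _ hn htlt m.toNat]
    rw [hq, hr, PySem.Int.mod_eq_emod_of_pos hn']
    have hd : ((j : Int) - mi - 1) % (xs.length : Int) = ((((((j : Int) - mi - 1) % (xs.length : Int)).toNat) : Nat) : Int) := by
      rw [Int.toNat_of_nonneg (Int.emod_nonneg _ hnz)]
    have hBc : (((j : Int) - mi - 1) % (xs.length : Int) < ((m.toNat % xs.length : Nat) : Int))
        ↔ (((((j : Int) - mi - 1) % (xs.length : Int)).toNat) < m.toNat % xs.length) := by
      rw [hd]
      exact_mod_cast Iff.rfl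
    have heqc : ((j : Int) = (mi : Int)) ↔ (mi = j) := by
      constructor <;> intro h <;> exact_mod_cast h.symm
    simp only [hBc, heqc]
    split_ifs <;> push_cast <;> ring
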